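-- pv_equiv track=rewrite | github.com/royliuyu/Corun-AI-client-server | datasets/caltech101.py | encoder_label
-- ===== SOURCE A (Python) =====
-- def encoder_label(labels_name_list):
--     label_names = list(dict.fromkeys(labels_name_list)) #unique
--     encoder ={}
--     label_encoder_list = []
--     for i, name in enumerate(label_names): encoder[name]=i
--     for label_name in labels_name_list:
--         label_encoder_list.append(int(encoder[label_name]))
--     return label_encoder_list
-- ===== SOURCE B (Python) =====
-- def encoder_label(labels_name_list):
--     # Code of a name = number of distinct names up to (and including) its first
--     # occurrence, minus 1 -- i.e. its rank in first-occurrence order.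
--     return [len(set(labels_name_list[:labels_name_list.index(name) + 1])) - 1
--             for name in labels_name_list]
-- ===== Notes on version B (the rewrite author's own statement) =====
-- stated objective: alternative
-- what changed: Builds no name-to-index mapping at all: each label's code is computed directly as the number of distinct names in the prefix ending at its first occurrence, minus one (index + set cardinality instead of A's dedup + enumerate-dict + lookup pass).
import Mathlib
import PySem

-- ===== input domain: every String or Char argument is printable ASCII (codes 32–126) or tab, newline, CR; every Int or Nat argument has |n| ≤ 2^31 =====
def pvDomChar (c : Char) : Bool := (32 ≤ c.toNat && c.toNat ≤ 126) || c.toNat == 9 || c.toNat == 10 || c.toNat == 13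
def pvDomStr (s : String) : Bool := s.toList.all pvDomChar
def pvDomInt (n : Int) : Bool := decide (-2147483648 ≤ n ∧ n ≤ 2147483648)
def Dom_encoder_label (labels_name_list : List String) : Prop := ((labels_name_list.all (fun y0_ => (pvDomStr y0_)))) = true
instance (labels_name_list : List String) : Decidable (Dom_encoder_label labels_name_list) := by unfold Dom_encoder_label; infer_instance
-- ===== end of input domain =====

-- B: one honest line — no name→index mapping at all: each label's code is computed directly as
-- (number of distinct names in the prefix through its first occurrence) − 1; alternative algorithm, not faster.
-- ===== PORT A =====
-- literal port of A; `encoder[label_name]` can never raise (every label is a dict key),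
-- so the lookup is ported as get? with an unreachable default, and int(x) on an int is identity.
def encoder_label (labels_name_list : List String) : List Int :=
  let label_names := PySem.List.dedup labels_name_list
  let encoder := (PySem.List.enumerate label_names).foldl
      (fun d q => d.insert q.2 q.1) PySem.Dict.empty
  labels_name_list.foldl (fun acc name => acc ++ [((encoder.get? name).getD 0)]) []

-- ===== PORT B =====
-- literal port of Source B's comprehension; `labels_name_list.index(name)` can never raise
-- (name is drawn from the list), so index? is ported with an unreachable default 0.
def encoder_label_alt (labels_name_list : List String) : List Int :=
  labels_name_list.map (fun name =>
    ((PySem.Set.ofList (PySem.List.slice labels_name_list none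
        (some ((((PySem.List.index? labels_name_list name).getD 0 : Nat) : Int) + 1)))).length : Int) - 1)

-- ===== PRECONDITION & SPEC =====
def Spec_encoder_label (labels_name_list : List String) (out : List Int) : Prop := out = encoder_label_alt labels_name_list
instance (labels_name_list : List String) (out : List Int) : Decidable (Spec_encoder_label labels_name_list out) := by unfold Spec_encoder_label; infer_instance

-- ===== CLAIM (what is proved, stated in full; the proofs are below) =====
def Claim_equal_encoder_label : Prop := ∀ (labels_name_list : List String), Dom_encoder_label labels_name_list → Spec_encoder_label labels_name_list (encoder_label labels_name_list)

-- ===== LEMMAS AND PROOFS =====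

/-- A's encoder dict, parameterised by the list it is built from. -/
def dictOf (p : List String) : PySem.Dict String Int :=
  (PySem.List.enumerate (PySem.List.dedup p)).foldl
    (fun d q => d.insert q.2 q.1) PySem.Dict.empty

lemma items_dictOf (p : List String) :
    (dictOf p).items = (PySem.List.enumerate (PySem.List.dedup p)).map (fun q => (q.2, q.1)) := by
  unfold dictOf
  have h := PySem.Dict.items_foldl_insert_fresh
    (PySem.List.enumerate (PySem.List.dedup p)) (fun q => q.2) (fun q => q.1)
    PySem.Dict.empty
    (by intro a _; exact PySem.Dict.contains_empty _)
    (by rw [PySem.List.map_snd_enumerate]; exact PySem.List.nodup_dedup _)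
  simpa using h

lemma keys_dictOf (p : List String) : (dictOf p).keys = PySem.List.dedup p := by
  show (dictOf p).items.map (·.1) = _
  rw [items_dictOf, List.map_map]
  exact PySem.List.map_snd_enumerate _ _

/-- A's lookup returns the index of the name in the deduplicated list. -/
lemma get?_dictOf (l : List String) (x : String) (k : Nat)
    (hk : PySem.List.index? (PySem.List.dedup l) x = some k) :
    (dictOf l).get? x = some (k : Int) := by
  obtain ⟨hlt, hget, -⟩ := PySem.List.getElem_of_index?_eq_some hk
  apply PySem.Dict.get?_of_mem_items
  · rw [items_dictOf]
    refine List.mem_map.mpr ⟨((k : Int), x), ?_, rfl⟩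
    rw [PySem.List.mem_enumerate_iff]
    exact ⟨k, hlt, by simp [← hget]⟩
  · rw [keys_dictOf]; exact PySem.List.nodup_dedup _

lemma dedup_snoc (p : List String) (n : String) :
    PySem.List.dedup (p ++ [n]) =
      if n ∈ p then PySem.List.dedup p else PySem.List.dedup p ++ [n] := by
  simp only [PySem.List.dedup_eq_ofList, PySem.Set.ofList_eq_foldl, List.foldl_append,
    List.foldl_cons, List.foldl_nil]
  rw [← PySem.Set.ofList_eq_foldl]
  by_cases h : n ∈ p
  · rw [if_pos h]; simp [PySem.Set.add]; exact h
  · rw [if_neg h]; simp [PySem.Set.add]; exact h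

/-- The first-occurrence index of an element of `p` inside `dedup` is stable under extending the list. -/
lemma index?_dedup_append (p t : List String) (x : String) (h : x ∈ p) :
    PySem.List.index? (PySem.List.dedup (p ++ t)) x = PySem.List.index? (PySem.List.dedup p) x := by
  induction t using List.reverseRecOn with
  | nil => simp
  | append_singleton ts y ih =>
    rw [← List.append_assoc, dedup_snoc]
    by_cases hy : y ∈ p ++ ts
    · rw [if_pos hy]; exact ih
    · rw [if_neg hy, PySem.List.index?_append_of_mem]
      · exact ih
      · rw [PySem.List.mem_dedup]; exact List.mem_append_left ts h

/-- Per-element agreement: A's dict lookup equals B's prefix-distinct count minus one. -/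
lemma elem_eq (l : List String) (x : String) (hx : x ∈ l) :
    ((dictOf l).get? x).getD 0 =
      ((PySem.Set.ofList (PySem.List.slice l none
        (some ((((PySem.List.index? l x).getD 0 : Nat) : Int) + 1)))).length : Int) - 1 := by
  obtain ⟨j, hj⟩ := Option.isSome_iff_exists.mp (Iff.mpr (PySem.List.index?_isSome_iff l x) hx)
  obtain ⟨pre, suf, hdecomp, hlen, hnot⟩ := Iff.mp (PySem.List.index?_eq_some_iff l x j) hj
  -- B side: the slice is pre ++ [x]
  have hslice : PySem.List.slice l none (some (((j : Nat) : Int) + 1)) = pre ++ [x] := by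
    have : (((j : Nat) : Int) + 1) = (((j + 1 : Nat)) : Int) := by push_cast; ring
    rw [this, PySem.List.slice_to_natCast, hdecomp, ← hlen]
    rw [show pre.length + 1 = pre.length + 1 from rfl, List.take_append]
    simp
  have hset : PySem.Set.ofList (pre ++ [x]) = PySem.Set.ofList pre ++ [x] := by
    rw [PySem.Set.ofList_append_singleton, PySem.Set.add_of_not_mem]
    rw [PySem.Set.mem_ofList]; exact hnot
  -- A side: index? (dedup l) x = some (dedup pre).length
  have hA : PySem.List.index? (PySem.List.dedup l) x = some (PySem.List.dedup pre).length := by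
    have h1 : l = (pre ++ [x]) ++ suf := by rw [hdecomp]; simp
    have hnd : x ∉ PySem.List.dedup pre := by
      rw [PySem.List.mem_dedup]; exact hnot
    rw [h1, index?_dedup_append _ _ _ (List.mem_append_right pre (List.mem_singleton.mpr rfl)),
      dedup_snoc, if_neg hnot]
    exact PySem.List.index?_append_singleton_self _ _ hnd
  rw [get?_dictOf l x _ hA, hj]
  simp only [Option.getD_some, hslice, hset]
  rw [List.length_append]
  push_cast
  simp [PySem.List.dedup_eq_ofList]

lemma foldl_append_map {α β : Type} (f : α → β) :
    ∀ (l : List α) (acc : List β),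
      l.foldl (fun acc x => acc ++ [f x]) acc = acc ++ l.map f := by
  intro l
  induction l with
  | nil => simp
  | cons x xs ih => intro acc; simp [List.foldl_cons, ih]

-- ===== VERDICT (by name: the statement is the Claim_ definition above) =====
theorem encoder_label_spec : Claim_equal_encoder_label := by
  intro l _
  unfold Spec_encoder_label encoder_label encoder_label_alt
  show l.foldl (fun acc name => acc ++ [((dictOf l).get? name).getD 0]) [] = _
  rw [foldl_append_map, List.nil_append]
  exact List.map_congr_left (fun x hx => elem_eq l x hx)
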